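-- pv_equiv track=rewrite | github.com/drizztSun/common_project | PythonLeetcode/leetcodeM/1648_SellDiminishingValuedColoredBalls.py | doit_greedy
-- ===== SOURCE A (Python) =====
-- def doit_greedy(inventory: list, orders:int) -> int:
--
--     inventory.append(0)
--     inventory.sort(reverse=True)
--     i, res, mod = 0, 0, 10**9+7
--
--     while orders:
--
--         while i < len(inventory) and inventory[i] == inventory[i+1]:
--             i += 1
--
--         level = inventory[i] - inventory[i+1]
--         if (i+1) * level < orders:
--             base = (i+1) * level * (inventory[i] + inventory[i+1] + 1) // 2
--             orders -= (i+1) * level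
--             inventory[i] = inventory[i+1]
--         else:
--             r, c = divmod(orders, i+1)
--             base = (i+1) * (2*inventory[i] - r + 1) * r // 2
--             base += c * (inventory[i] - r)
--             orders -= orders
--
--         res = (res + base) % mod
--
--     return int(res)
-- ===== SOURCE B (Python) =====
-- def doit_greedy(inventory: list, orders: int) -> int:
--     # same observable mutation as the original: append 0, sort descending
--     inventory.append(0)
--     inventory.sort(reverse=True)
--
--     def units_above(t):
--         # number of single-ball sales with price strictly greater than t
--         return sum(v - t for v in inventory if v > t)
--
--     # binary-search the smallest price level t with units_above(t) <= orders
--     lo, hi = 0, inventory[0]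
--     while lo < hi:
--         mid = (lo + hi) // 2
--         if units_above(mid) <= orders:
--             hi = mid
--         else:
--             lo = mid + 1
--     t = lo
--
--     # all sales at prices > t, as arithmetic series, plus the leftovers at price t
--     total = sum((v - t) * (v + t + 1) // 2 for v in inventory if v > t)
--     total += (orders - units_above(t)) * t
--     return total % (10**9 + 7)
-- ===== Notes on version B (the rewrite author's own statement) =====
-- stated objective: alternative
-- what changed: Replaced A's level-by-level greedy descent (mutable index walking down equal-value plateaus) with a binary search over the price range for the smallest threshold t whose above-t sales fit in orders, followed by one closed-form bulk summation of the arithmetic series above t plus the leftovers at price t.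
-- outside the precondition, e.g. on doit_greedy([2], -3): A returns 999999995, B returns 1000000001; on doit_greedy([-5], 3): A returns 1000000004, B returns 0; on doit_greedy([1], 5): A raises IndexError, B returns 1
import Mathlib
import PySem

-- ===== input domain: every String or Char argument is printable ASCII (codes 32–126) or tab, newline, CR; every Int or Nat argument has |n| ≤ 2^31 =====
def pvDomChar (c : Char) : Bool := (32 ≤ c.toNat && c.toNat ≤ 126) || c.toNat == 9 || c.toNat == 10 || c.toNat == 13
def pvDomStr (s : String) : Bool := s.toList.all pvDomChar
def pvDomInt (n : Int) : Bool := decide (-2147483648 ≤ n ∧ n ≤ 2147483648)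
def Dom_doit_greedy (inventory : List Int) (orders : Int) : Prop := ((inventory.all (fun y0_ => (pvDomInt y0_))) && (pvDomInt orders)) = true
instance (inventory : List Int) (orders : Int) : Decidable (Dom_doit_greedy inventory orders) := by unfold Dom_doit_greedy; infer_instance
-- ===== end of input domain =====

-- B replaces A's level-by-level greedy descent with a binary search for the price threshold plus
-- one closed-form bulk summation (objective: alternative algorithm, similar cost). Both A and B
-- mutate the Python argument the same way (append 0, sort descending); the theorems below are
-- about the return value.

-- ===== PORT A =====

-- inner while loop: advance i while inventory[i] == inventory[i+1]; i is a non-negative Python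
-- index, kept as Nat; an out-of-range read (IndexError in Python, excluded by Pre_) defaults to 0
def pvScanA (inv : List Int) (i : Nat) : Nat :=
  if h : (i : Int) < PySem.List.len inv ∧ inv.getD i 0 = inv.getD (i+1) 0 then
    pvScanA inv (i+1)
  else i
termination_by inv.length - i
decreasing_by
  simp only [PySem.List.len_eq] at h
  have := h.1
  omega

-- outer while loop; fuel only makes the recursion total (inside Pre_, orders strictly decreases
-- each iteration, so fuel = orders.toNat + 1 is never exhausted)
def pvLoopA (inv : List Int) (i : Nat) (orders res : Int) : Nat → Int
  | 0 => res
  | fuel+1 =>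
    if orders = 0 then res
    else
      let j := pvScanA inv i
      let hi := inv.getD j 0
      let lo := inv.getD (j+1) 0
      let level := hi - lo
      if ((j : Int) + 1) * level < orders then
        pvLoopA (inv.set j lo) j (orders - ((j : Int) + 1) * level)
          ((res + PySem.Int.floordiv (((j : Int) + 1) * level * (hi + lo + 1)) 2) % 1000000007) fuel
      else
        -- divmod(orders, i+1): the divisor i+1 is positive, so divmod never raises
        let r := PySem.Int.floordiv orders ((j : Int) + 1)
        let c := PySem.Int.mod orders ((j : Int) + 1)
        (res + (PySem.Int.floordiv (((j : Int) + 1) * (2 * hi - r + 1) * r) 2 + c * (hi - r))) % 1000000007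

def doit_greedy (inventory : List Int) (orders : Int) : Int :=
  let inv := PySem.List.sorted (inventory ++ [0]) (fun v => v) true
  pvLoopA inv 0 orders 0 (orders.toNat + 1)

-- ===== PORT B =====

-- units_above(t): sum(v - t for v in inventory if v > t)
def pvUnits (inv : List Int) (t : Int) : Int :=
  inv.foldl (fun acc v => if t < v then acc + (v - t) else acc) 0

-- binary search for the smallest t in [lo, hi] with units_above(t) <= orders
def pvBisect (inv : List Int) (orders lo hi : Int) : Int :=
  if hlt : lo < hi then
    let mid := PySem.Int.floordiv (lo + hi) 2
    if pvUnits inv mid ≤ orders then pvBisect inv orders lo mid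
    else pvBisect inv orders (mid + 1) hi
  else lo
termination_by (hi - lo).toNat
decreasing_by
  · have h2 : PySem.Int.floordiv (lo + hi) 2 < hi := by
      rw [PySem.Int.floordiv_lt_iff_lt_mul (by norm_num)]; omega
    omega
  · have hb := PySem.Int.floordiv_two_mid_bounds (le_of_lt hlt)
    omega

def doit_greedy_alt (inventory : List Int) (orders : Int) : Int :=
  let inv := PySem.List.sorted (inventory ++ [0]) (fun v => v) true
  let t := pvBisect inv orders 0 (PySem.List.pyGetD inv 0 0)
  let total := inv.foldl
    (fun acc v => if t < v then acc + PySem.Int.floordiv ((v - t) * (v + t + 1)) 2 else acc) 0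
  (total + (orders - pvUnits inv t) * t) % 1000000007

-- ===== PRECONDITION & SPEC =====

-- Pre_ restricts to the problem's natural domain: 0 <= orders <= total sellable stock (sum of the
-- positive values). Outside it A either raises IndexError (orders exceeding the non-negative
-- stock) or returns meaningless totals from selling non-existent or negative-priced balls
-- (negative orders, or orders exceeding the positive stock while negative values are present).
def Pre_doit_greedy (inventory : List Int) (orders : Int) : Prop :=
  0 ≤ orders ∧ orders ≤ (inventory.map (fun v => max v 0)).sum
instance (inventory : List Int) (orders : Int) : Decidable (Pre_doit_greedy inventory orders) := by
  unfold Pre_doit_greedy; infer_instance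

def pvWitness_doit_greedy : List Int × Int := ([3, 1], 2)

def Spec_doit_greedy (inventory : List Int) (orders : Int) (out : Int) : Prop :=
  out = doit_greedy_alt inventory orders
instance (inventory : List Int) (orders : Int) (out : Int) : Decidable (Spec_doit_greedy inventory orders out) := by
  unfold Spec_doit_greedy; infer_instance

-- ===== CLAIM (what is proved, stated in full; the proofs are below) =====
def Claim_equal_doit_greedy : Prop := ∀ (inventory : List Int) (orders : Int),
  Dom_doit_greedy inventory orders → Pre_doit_greedy inventory orders →
  Spec_doit_greedy inventory orders (doit_greedy inventory orders)

-- ===== LEMMAS AND PROOFS =====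

-- mathematical abstractions of B's sums
def pvU (xs : List Int) (t : Int) : Int :=
  (xs.map (fun v => if t < v then v - t else 0)).sum

def pvSg (t v : Int) : Int := PySem.Int.floordiv ((v - t) * (v + t + 1)) 2

def pvSS (xs : List Int) (t : Int) : Int :=
  (xs.map (fun v => if t < v then pvSg t v else 0)).sum

def pvRev (xs : List Int) (orders t : Int) : Int :=
  pvSS xs t + (orders - pvU xs t) * t

-- t is THE threshold: least t ≥ 0 with pvU xs t ≤ orders
def pvIsTh (xs : List Int) (orders t : Int) : Prop :=
  0 ≤ t ∧ pvU xs t ≤ orders ∧ (t = 0 ∨ orders < pvU xs (t - 1))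

-- the effective inventory of A's loop state: columns 0..i all hold inv[i] (entries 0..i-1 are
-- stale and never read again), columns beyond i as stored
def pvEff (inv : List Int) (i : Nat) : List Int :=
  List.replicate (i + 1) (inv.getD i 0) ++ inv.drop (i + 1)

lemma pvFoldl_cond_add (g : Int → Int) (t : Int) :
    ∀ (xs : List Int) (a : Int),
      xs.foldl (fun acc v => if t < v then acc + g v else acc) a
        = a + (xs.map (fun v => if t < v then g v else 0)).sum := by
  intro xs
  induction xs with
  | nil => intro a; simp
  | cons x xs ih =>
      intro a
      by_cases hx : t < x
      · simp [hx, ih]; ring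
      · simp [hx, ih]


lemma pvUnits_eq (inv : List Int) (t : Int) : pvUnits inv t = pvU inv t := by
  simpa [pvU] using pvFoldl_cond_add (fun v => v - t) t inv 0


lemma pvU_append (xs ys : List Int) (t : Int) : pvU (xs ++ ys) t = pvU xs t + pvU ys t := by
  simp [pvU]


lemma pvU_replicate (k : Nat) (h t : Int) :
    pvU (List.replicate k h) t = k * (if t < h then h - t else 0) := by
  induction k with
  | zero => simp [pvU]
  | succ k ih =>
      simp only [List.replicate_succ, pvU, List.map_cons, List.sum_cons] at *
      rw [ih]; push_cast; ring


lemma pvSS_append (xs ys : List Int) (t : Int) : pvSS (xs ++ ys) t = pvSS xs t + pvSS ys t := by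
  simp [pvSS]


lemma pvSS_replicate (k : Nat) (h t : Int) :
    pvSS (List.replicate k h) t = k * (if t < h then pvSg t h else 0) := by
  induction k with
  | zero => simp [pvSS]
  | succ k ih =>
      simp only [List.replicate_succ, pvSS, List.map_cons, List.sum_cons] at *
      rw [ih]; push_cast; ring


lemma pvU_nonneg (xs : List Int) (t : Int) : 0 ≤ pvU xs t := by
  induction xs with
  | nil => simp [pvU]
  | cons x xs ih =>
      simp only [pvU, List.map_cons, List.sum_cons] at *
      split <;> omega


lemma pvU_antitone (xs : List Int) {s t : Int} (hst : s ≤ t) : pvU xs t ≤ pvU xs s := by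
  induction xs with
  | nil => simp [pvU]
  | cons x xs ih =>
      simp only [pvU, List.map_cons, List.sum_cons] at *
      split_ifs <;> omega


lemma pvU_zero_of_le (xs : List Int) (t : Int) (h : ∀ v ∈ xs, v ≤ t) : pvU xs t = 0 := by
  induction xs with
  | nil => simp [pvU]
  | cons x xs ih =>
      simp only [pvU, List.map_cons, List.sum_cons] at *
      have hx := h x (by simp)
      rw [if_neg (by omega), ih (fun v hv => h v (by simp [hv]))]
      omega


lemma le_of_pvU_eq_zero (xs : List Int) (t : Int) (h : pvU xs t = 0) : ∀ v ∈ xs, v ≤ t := by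
  induction xs with
  | nil => simp
  | cons x xs ih =>
      simp only [pvU, List.map_cons, List.sum_cons] at h
      have h1 : 0 ≤ pvU xs t := pvU_nonneg xs t
      simp only [pvU] at h1
      have hx : (if t < x then x - t else 0) = 0 ∧ (xs.map (fun v => if t < v then v - t else 0)).sum = 0 := by
        constructor <;> (split at h <;> omega)
      intro v hv
      rcases List.mem_cons.1 hv with rfl | hv
      · rcases hx.1 with h2; split at h2 <;> omega
      · exact ih hx.2 v hv


lemma pvSS_zero_of_le (xs : List Int) (t : Int) (h : ∀ v ∈ xs, v ≤ t) : pvSS xs t = 0 := by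
  induction xs with
  | nil => simp [pvSS]
  | cons x xs ih =>
      simp only [pvSS, List.map_cons, List.sum_cons] at *
      have hx := h x (by simp)
      rw [if_neg (by omega), ih (fun v hv => h v (by simp [hv]))]
      omega


lemma pvU_perm {xs ys : List Int} (h : xs.Perm ys) (t : Int) : pvU xs t = pvU ys t := by
  exact (h.map _).sum_eq


lemma pvTwo_dvd (t v : Int) : (2 : Int) ∣ (v - t) * (v + t + 1) := by
  have h1 : (v - t) * (v + t + 1) = v * (v + 1) - t * (t + 1) := by ring
  rw [h1]
  exact dvd_sub (even_iff_two_dvd.mp (Int.even_mul_succ_self v)) (even_iff_two_dvd.mp (Int.even_mul_succ_self t))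


lemma pvFdiv_exact {x : Int} (h : (2 : Int) ∣ x) : 2 * PySem.Int.floordiv x 2 = x := by
  rw [PySem.Int.floordiv_eq_ediv_of_pos (by norm_num)]
  omega


lemma pvSg_self (t : Int) : pvSg t t = 0 := by
  simp [pvSg, PySem.Int.floordiv]


lemma pvTh_unique {xs : List Int} {orders t t' : Int}
    (h1 : pvIsTh xs orders t) (h2 : pvIsTh xs orders t') : t = t' := by
  obtain ⟨h0, hle, hmin⟩ := h1
  obtain ⟨h0', hle', hmin'⟩ := h2
  by_contra hne
  rcases lt_or_gt_of_ne hne with hlt | hlt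
  · rcases hmin' with rfl | hm
    · omega
    · have : pvU xs (t' - 1) ≤ pvU xs t := pvU_antitone xs (by omega)
      omega
  · rcases hmin with rfl | hm
    · omega
    · have : pvU xs (t - 1) ≤ pvU xs t' := pvU_antitone xs (by omega)
      omega


lemma pvBisect_spec (inv : List Int) (orders : Int) :
    ∀ (n : Nat) (lo hi : Int), (hi - lo).toNat = n → 0 ≤ lo → lo ≤ hi →
      pvU inv hi ≤ orders → (lo = 0 ∨ orders < pvU inv (lo - 1)) →
      pvIsTh inv orders (pvBisect inv orders lo hi) := by
  intro n
  induction n using Nat.strong_induction_on with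
  | _ n ih =>
    intro lo hi hn h0 hlh hhi hmin
    rw [pvBisect]
    by_cases hlt : lo < hi
    · rw [dif_pos hlt]
      have hb := PySem.Int.floordiv_two_mid_bounds (le_of_lt hlt)
      have hmidlt : PySem.Int.floordiv (lo + hi) 2 < hi := by
        rw [PySem.Int.floordiv_lt_iff_lt_mul (by norm_num)]; omega
      set mid := PySem.Int.floordiv (lo + hi) 2 with hmid
      by_cases hum : pvUnits inv mid ≤ orders
      · rw [if_pos hum]
        rw [pvUnits_eq] at hum
        exact ih (mid - lo).toNat (by omega) lo mid (by omega) h0 (by omega) hum hmin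
      · rw [if_neg hum]
        rw [pvUnits_eq] at hum
        exact ih (hi - (mid + 1)).toNat (by omega) (mid + 1) hi (by omega) (by omega) (by omega)
          hhi (Or.inr (by simpa using not_le.mp hum))
    · rw [dif_neg hlt]
      have : lo = hi := by omega
      subst this
      exact ⟨h0, hhi, hmin⟩


lemma pvScan_spec (inv : List Int) :
    ∀ (i : Nat), i < inv.length →
      (inv.drop i).Pairwise (fun a b => b ≤ a) →
      0 < inv.getD i 0 →
      (0 : Int) ∈ inv.drop i →
      i ≤ pvScanA inv i ∧ pvScanA inv i + 1 < inv.length ∧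
      inv.getD (pvScanA inv i) 0 = inv.getD i 0 ∧
      inv.getD (pvScanA inv i + 1) 0 < inv.getD i 0 ∧
      inv.drop i = List.replicate (pvScanA inv i - i) (inv.getD i 0) ++ inv.drop (pvScanA inv i) := by
  suffices H : ∀ (n : Nat) (i : Nat), inv.length - i = n → i < inv.length →
      (inv.drop i).Pairwise (fun a b => b ≤ a) → 0 < inv.getD i 0 → (0 : Int) ∈ inv.drop i →
      i ≤ pvScanA inv i ∧ pvScanA inv i + 1 < inv.length ∧
      inv.getD (pvScanA inv i) 0 = inv.getD i 0 ∧
      inv.getD (pvScanA inv i + 1) 0 < inv.getD i 0 ∧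
      inv.drop i = List.replicate (pvScanA inv i - i) (inv.getD i 0) ++ inv.drop (pvScanA inv i) by
    intro i hi hs hpos h0
    exact H (inv.length - i) i rfl hi hs hpos h0
  intro n
  induction n using Nat.strong_induction_on with
  | _ n ih =>
  intro i hn hi hs hpos h0
  have hd : inv.drop i = inv[i] :: inv.drop (i+1) := List.drop_eq_getElem_cons hi
  have hgd : inv.getD i 0 = inv[i] := List.getD_eq_getElem inv 0 hi
  by_cases hc : inv.getD i 0 = inv.getD (i+1) 0
  · -- equal neighbours: the scan moves on
    have hi1 : i + 1 < inv.length := by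
      by_contra hcon
      have h00 : inv.getD (i+1) 0 = 0 := List.getD_eq_default _ _ (by omega)
      omega
    have hstep : pvScanA inv i = pvScanA inv (i+1) := by
      rw [pvScanA, dif_pos ⟨by simp [PySem.List.len_eq]; omega, hc⟩]
    have hgd1 : inv.getD (i+1) 0 = inv[i+1] := List.getD_eq_getElem inv 0 hi1
    have hs1 : (inv.drop (i+1)).Pairwise (fun a b => b ≤ a) := by
      rw [hd] at hs; exact (List.pairwise_cons.mp hs).2
    have h0' : (0 : Int) ∈ inv.drop (i+1) := by
      rw [hd] at h0
      rcases List.mem_cons.mp h0 with h | h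
      · omega
      · exact h
    obtain ⟨j1, j2, j3, j4, j5⟩ :=
      ih (inv.length - (i+1)) (by omega) (i+1) rfl hi1 hs1 (by omega) h0'
    rw [hstep]
    refine ⟨by omega, j2, by omega, by omega, ?_⟩
    have hji : pvScanA inv (i+1) - i = (pvScanA inv (i+1) - (i+1)) + 1 := by omega
    rw [hd, hji, List.replicate_succ, List.cons_append, hgd]
    congr 1
    rw [j5, ← hc, hgd]
  · -- unequal: the scan stops here
    have hstop : pvScanA inv i = i := by
      rw [pvScanA, dif_neg (fun hcond => hc hcond.2)]
    have hi1 : i + 1 < inv.length := by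
      by_contra hcon
      have hdrop : inv.drop (i+1) = [] := List.drop_eq_nil_of_le (by omega)
      rw [hd, hdrop] at h0
      simp at h0
      omega
    have hgd1 : inv.getD (i+1) 0 = inv[i+1] := List.getD_eq_getElem inv 0 hi1
    have hle : inv[i+1] ≤ inv[i] := by
      rw [hd] at hs
      exact (List.pairwise_cons.mp hs).1 _
        (by rw [List.drop_eq_getElem_cons hi1]; exact List.mem_cons_self ..)
    rw [hstop]
    exact ⟨le_refl _, hi1, rfl, by omega, by simp⟩

set_option maxHeartbeats 2000000 in
lemma pvLoop_spec :
    ∀ (fuel : Nat) (inv : List Int) (i : Nat) (orders res t : Int),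
      orders.toNat < fuel →
      i < inv.length →
      (inv.drop i).Pairwise (fun a b => b ≤ a) →
      (0 : Int) ∈ inv.drop i →
      0 ≤ orders →
      orders ≤ pvU (pvEff inv i) 0 →
      0 ≤ res → res < 1000000007 →
      pvIsTh (pvEff inv i) orders t →
      pvLoopA inv i orders res fuel = (res + pvRev (pvEff inv i) orders t) % 1000000007 := by
  intro fuel
  induction fuel with
  | zero =>
      intro inv i orders res t hfuel
      exact absurd hfuel (by omega)
  | succ fuel ihf =>
  intro inv i orders res t hfuel hilt hsort hmem0 hor hub hres0 hresM hth
  rw [pvLoopA]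
  by_cases ho : orders = 0
  · subst ho
    have hU0 : pvU (pvEff inv i) t = 0 := le_antisymm hth.2.1 (pvU_nonneg _ _)
    have hSS : pvSS (pvEff inv i) t = 0 := pvSS_zero_of_le _ _ (le_of_pvU_eq_zero _ _ hU0)
    simp [pvRev, hSS, hU0, Int.emod_eq_of_lt hres0 hresM]
  · simp only [if_neg ho]
    have horpos : 0 < orders := by omega
    have hd : inv.drop i = inv[i] :: inv.drop (i+1) := List.drop_eq_getElem_cons hilt
    have hgd : inv.getD i 0 = inv[i] := List.getD_eq_getElem inv 0 hilt
    have hpos : 0 < inv.getD i 0 := by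
      by_contra hcon
      push_neg at hcon
      have hall : ∀ v ∈ pvEff inv i, v ≤ 0 := by
        intro v hv
        rcases List.mem_append.mp hv with hv | hv
        · have := List.eq_of_mem_replicate hv; omega
        · have h1 := (List.pairwise_cons.mp (hd ▸ hsort)).1 v hv; omega
      have := pvU_zero_of_le _ 0 hall
      omega
    obtain ⟨hij, hj1, hjh, hjlo, hjrep⟩ := pvScan_spec inv i hilt hsort hpos hmem0
    set j := pvScanA inv i with hjdef
    have hjlen : j < inv.length := by omega
    have hdj : inv.drop j = inv[j] :: inv.drop (j+1) := List.drop_eq_getElem_cons hjlen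
    have hgj : inv.getD j 0 = inv[j] := List.getD_eq_getElem inv 0 hjlen
    have hdj1 : inv.drop (j+1) = inv[j+1] :: inv.drop (j+2) := List.drop_eq_getElem_cons hj1
    have hgj1 : inv.getD (j+1) 0 = inv[j+1] := List.getD_eq_getElem inv 0 hj1
    -- the effective inventory is unchanged by the scan
    have hdi1 : inv.drop (i+1) = List.replicate (j - i) (inv.getD i 0) ++ inv.drop (j+1) := by
      rcases Nat.eq_or_lt_of_le hij with heq | hlt
      · simp [← heq]
      · have hk : j - i = (j - i - 1) + 1 := by omega
        have h1 : inv.drop i = inv.getD i 0 :: (List.replicate (j - i - 1) (inv.getD i 0) ++ inv.drop j) := by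
          rw [hjrep, hk, List.replicate_succ, List.cons_append]
          simp
        rw [hd] at h1
        have h2 := (List.cons.injEq _ _ _ _).mp h1
        rw [h2.2, hdj, ← hgj, hjh, hk, List.replicate_succ']
        simp
    have heff : pvEff inv i = pvEff inv j := by
      unfold pvEff
      rw [hjh, hdi1, ← List.append_assoc, ← List.replicate_add]
      congr 2
      omega
    rw [heff] at hth hub ⊢
    -- order and membership facts about the suffix
    have hsj1 : (inv.drop (j+1)).Pairwise (fun a b => b ≤ a) := by
      have h1 : (inv.drop i).drop (j+1-i) = inv.drop (j+1) := by
        rw [List.drop_drop]; congr 1; omega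
      rw [← h1]
      exact hsort.sublist (List.drop_sublist ..)
    have htl_le : ∀ v ∈ inv.drop (j+1), v ≤ inv.getD (j+1) 0 := by
      intro v hv
      rw [hdj1] at hv
      rw [hdj1] at hsj1
      rcases List.mem_cons.mp hv with rfl | hv
      · omega
      · have := (List.pairwise_cons.mp hsj1).1 v hv; omega
    have h0tl : (0 : Int) ∈ inv.drop (j+1) := by
      rw [hjrep, List.mem_append] at hmem0
      rcases hmem0 with hm | hm
      · have := List.eq_of_mem_replicate hm; omega
      · rw [hdj, List.mem_cons] at hm
        rcases hm with hm | hm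
        · rw [← hgj, hjh] at hm; omega
        · exact hm
    have hjhpos : 0 < inv.getD j 0 := by omega
    -- sum decompositions over the effective inventory
    have hUE : ∀ s : Int, pvU (pvEff inv j) s
        = ((j:Int)+1) * (if s < inv.getD j 0 then inv.getD j 0 - s else 0) + pvU (inv.drop (j+1)) s := by
      intro s
      unfold pvEff
      rw [pvU_append, pvU_replicate]
      push_cast
      ring
    have hSSE : ∀ s : Int, pvSS (pvEff inv j) s
        = ((j:Int)+1) * (if s < inv.getD j 0 then pvSg s (inv.getD j 0) else 0) + pvSS (inv.drop (j+1)) s := by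
      intro s
      unfold pvEff
      rw [pvSS_append, pvSS_replicate]
      push_cast
      ring
    have hkpos : (0:Int) < (j:Int)+1 := by positivity
    by_cases hbr : ((j:Int)+1) * (inv.getD j 0 - inv.getD (j+1) 0) < orders
    · rw [if_pos hbr]
      -- branch 1: sell the whole top level down to the next value
      have hLO0 : 0 ≤ inv.getD (j+1) 0 := by
        by_contra hcon
        push_neg at hcon
        have htl0 : pvU (inv.drop (j+1)) 0 = 0 :=
          pvU_zero_of_le _ _ (fun v hv => by have := htl_le v hv; omega)
        have hE0 : pvU (pvEff inv j) 0 = ((j:Int)+1) * (inv.getD j 0) := by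
          rw [hUE 0, if_pos hjhpos, htl0]; ring
        rw [hE0] at hub
        have h1 : inv.getD j 0 - inv.getD (j+1) 0 < inv.getD j 0 :=
          lt_of_mul_lt_mul_left (lt_of_lt_of_le hbr hub) (by omega)
        omega
      have htLO : t ≤ inv.getD (j+1) 0 := by
        by_contra hcon
        push_neg at hcon
        have hmin : orders < pvU (pvEff inv j) (t-1) := by
          rcases hth.2.2 with h | h
          · omega
          · exact h
        have h1 : pvU (pvEff inv j) (t-1) ≤ pvU (pvEff inv j) (inv.getD (j+1) 0) :=
          pvU_antitone _ (by omega)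
        have htl0 : pvU (inv.drop (j+1)) (inv.getD (j+1) 0) = 0 :=
          pvU_zero_of_le _ _ htl_le
        have h2 : pvU (pvEff inv j) (inv.getD (j+1) 0)
            = ((j:Int)+1) * (inv.getD j 0 - inv.getD (j+1) 0) := by
          rw [hUE _, htl0, if_pos (by omega)]; ring
        linarith
      set inv2 := inv.set j (inv.getD (j+1) 0) with hinv2
      have hlen2 : inv2.length = inv.length := by simp [hinv2]
      have hdropj1 : inv2.drop (j+1) = inv.drop (j+1) := by
        rw [hinv2]
        exact List.drop_set_of_lt (by omega)
      have hget2 : inv2.getD j 0 = inv.getD (j+1) 0 := by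
        rw [List.getD_eq_getElem inv2 0 (by omega)]
        simp [hinv2]
      have hdrop2 : inv2.drop j = inv.getD (j+1) 0 :: inv.drop (j+1) := by
        have h1 : inv2.drop j = inv2[j]'(by omega) :: inv2.drop (j+1) :=
          List.drop_eq_getElem_cons (by omega)
        rw [h1, hdropj1]
        congr 1
        rw [← List.getD_eq_getElem inv2 0 (by omega), hget2]
      have heff2 : pvEff inv2 j = List.replicate (j+1) (inv.getD (j+1) 0) ++ inv.drop (j+1) := by
        unfold pvEff
        rw [hget2, hdropj1]
      have hU2 : ∀ s : Int, pvU (pvEff inv2 j) s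
          = ((j:Int)+1) * (if s < inv.getD (j+1) 0 then inv.getD (j+1) 0 - s else 0)
            + pvU (inv.drop (j+1)) s := by
        intro s
        rw [heff2, pvU_append, pvU_replicate]
        push_cast
        ring
      have hSS2 : ∀ s : Int, pvSS (pvEff inv2 j) s
          = ((j:Int)+1) * (if s < inv.getD (j+1) 0 then pvSg s (inv.getD (j+1) 0) else 0)
            + pvSS (inv.drop (j+1)) s := by
        intro s
        rw [heff2, pvSS_append, pvSS_replicate]
        push_cast
        ring
      have hsort2 : (inv2.drop j).Pairwise (fun a b => b ≤ a) := by
        rw [hdrop2]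
        exact List.pairwise_cons.mpr ⟨htl_le, hsj1⟩
      have hmem2 : (0:Int) ∈ inv2.drop j := by
        rw [hdrop2]
        exact List.mem_cons_of_mem _ h0tl
      have hor2 : 0 ≤ orders - ((j:Int)+1) * (inv.getD j 0 - inv.getD (j+1) 0) := by linarith
      have hub2 : orders - ((j:Int)+1) * (inv.getD j 0 - inv.getD (j+1) 0) ≤ pvU (pvEff inv2 j) 0 := by
        have h1 := hub
        rw [hUE 0, if_pos hjhpos] at h1
        rw [hU2 0]
        have hif : (if (0:Int) < inv.getD (j+1) 0 then inv.getD (j+1) 0 - 0 else 0)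
            = inv.getD (j+1) 0 := by
          split <;> omega
        rw [hif]
        linarith [h1]
      have hUt : pvU (pvEff inv j) t = ((j:Int)+1) * (inv.getD j 0 - t) + pvU (inv.drop (j+1)) t := by
        rw [hUE t, if_pos (by omega)]
      have hUt2 : pvU (pvEff inv2 j) t
          = ((j:Int)+1) * (inv.getD (j+1) 0 - t) + pvU (inv.drop (j+1)) t := by
        rw [hU2 t]
        have hif : (if t < inv.getD (j+1) 0 then inv.getD (j+1) 0 - t else 0)
            = inv.getD (j+1) 0 - t := by
          split <;> omega
        rw [hif]
      have hth2 : pvIsTh (pvEff inv2 j) (orders - ((j:Int)+1) * (inv.getD j 0 - inv.getD (j+1) 0)) t := by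
        refine ⟨hth.1, ?_, ?_⟩
        · have h1 := hth.2.1
          rw [hUt] at h1
          rw [hUt2]
          linarith [h1]
        · rcases hth.2.2 with h | h
          · exact Or.inl h
          · refine Or.inr ?_
            have hA : pvU (pvEff inv j) (t-1)
                = ((j:Int)+1) * (inv.getD j 0 - (t-1)) + pvU (inv.drop (j+1)) (t-1) := by
              rw [hUE _, if_pos (by omega)]
            have hB : pvU (pvEff inv2 j) (t-1)
                = ((j:Int)+1) * (inv.getD (j+1) 0 - (t-1)) + pvU (inv.drop (j+1)) (t-1) := by
              rw [hU2 _]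
              have hif : (if t - 1 < inv.getD (j+1) 0 then inv.getD (j+1) 0 - (t-1) else 0)
                  = inv.getD (j+1) 0 - (t-1) := by
                split <;> omega
              rw [hif]
            rw [hA] at h
            rw [hB]
            linarith [h]
      have hlevel1 : 1 ≤ ((j:Int)+1) * (inv.getD j 0 - inv.getD (j+1) 0) := by
        have h1 := mul_pos hkpos (show (0:Int) < inv.getD j 0 - inv.getD (j+1) 0 by omega)
        exact h1
      have hfuel2 : ∀ o2 : Int, 0 ≤ o2 → o2 ≤ orders - 1 → o2.toNat < fuel := by
        intro o2 ha hb
        omega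
      rw [ihf inv2 j _ _ t (hfuel2 _ hor2 (by linarith)) (by omega) hsort2 hmem2 hor2 hub2
        (Int.emod_nonneg _ (by norm_num)) (Int.emod_lt_of_pos _ (by norm_num)) hth2]
      have hbase : PySem.Int.floordiv
          (((j:Int)+1) * (inv.getD j 0 - inv.getD (j+1) 0) * (inv.getD j 0 + inv.getD (j+1) 0 + 1)) 2
          = ((j:Int)+1) * (pvSg t (inv.getD j 0) - pvSg t (inv.getD (j+1) 0)) := by
        have h2L : 2 * PySem.Int.floordiv
            (((j:Int)+1) * (inv.getD j 0 - inv.getD (j+1) 0) * (inv.getD j 0 + inv.getD (j+1) 0 + 1)) 2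
            = ((j:Int)+1) * (inv.getD j 0 - inv.getD (j+1) 0) * (inv.getD j 0 + inv.getD (j+1) 0 + 1) := by
          apply pvFdiv_exact
          have hre : ((j:Int)+1) * (inv.getD j 0 - inv.getD (j+1) 0) * (inv.getD j 0 + inv.getD (j+1) 0 + 1)
              = ((j:Int)+1) * ((inv.getD j 0 - inv.getD (j+1) 0) * (inv.getD j 0 + inv.getD (j+1) 0 + 1)) := by
            ring
          rw [hre]
          exact Dvd.dvd.mul_left (pvTwo_dvd (inv.getD (j+1) 0) (inv.getD j 0)) _
        have e1 := pvFdiv_exact (pvTwo_dvd t (inv.getD j 0))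
        have e2 := pvFdiv_exact (pvTwo_dvd t (inv.getD (j+1) 0))
        have e1k := congrArg (fun x => ((j:Int)+1) * x) e1
        have e2k := congrArg (fun x => ((j:Int)+1) * x) e2
        dsimp only at e1k e2k
        unfold pvSg
        refine mul_left_cancel₀ (show (2:Int) ≠ 0 by norm_num) ?_
        rw [h2L]
        have hx : (2:Int) * (((j:Int)+1) * (PySem.Int.floordiv ((inv.getD j 0 - t) * (inv.getD j 0 + t + 1)) 2
              - PySem.Int.floordiv ((inv.getD (j+1) 0 - t) * (inv.getD (j+1) 0 + t + 1)) 2))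
            = ((j:Int)+1) * (2 * PySem.Int.floordiv ((inv.getD j 0 - t) * (inv.getD j 0 + t + 1)) 2)
              - ((j:Int)+1) * (2 * PySem.Int.floordiv ((inv.getD (j+1) 0 - t) * (inv.getD (j+1) 0 + t + 1)) 2) := by
          ring
        rw [hx, e1k, e2k]
        ring
      have hrev : pvRev (pvEff inv j) orders t
          = PySem.Int.floordiv
              (((j:Int)+1) * (inv.getD j 0 - inv.getD (j+1) 0) * (inv.getD j 0 + inv.getD (j+1) 0 + 1)) 2
            + pvRev (pvEff inv2 j) (orders - ((j:Int)+1) * (inv.getD j 0 - inv.getD (j+1) 0)) t := by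
        unfold pvRev
        rw [hSSE t, hSS2 t, hUt, hUt2, hbase]
        have hif1 : (if t < inv.getD j 0 then pvSg t (inv.getD j 0) else 0) = pvSg t (inv.getD j 0) :=
          if_pos (by omega)
        have hif2 : (if t < inv.getD (j+1) 0 then pvSg t (inv.getD (j+1) 0) else 0)
            = pvSg t (inv.getD (j+1) 0) := by
          rcases lt_or_eq_of_le htLO with h | h
          · exact if_pos h
          · rw [← h]
            simp [pvSg_self]
        rw [hif1, hif2]
        ring
      rw [hrev, Int.emod_add_emod]
      congr 1
      ring
    · rw [if_neg hbr]
      -- branch 2: the last level, divmod split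
      push_neg at hbr
      have hdm := PySem.Int.floordiv_mul_add_mod orders ((j:Int)+1)
      set r := PySem.Int.floordiv orders ((j:Int)+1) with hrdef
      set c := PySem.Int.mod orders ((j:Int)+1) with hcdef
      have hcb : 0 ≤ c ∧ c < (j:Int)+1 := by
        rw [hcdef, PySem.Int.mod_eq_emod_of_pos hkpos]
        exact ⟨Int.emod_nonneg _ (by omega), Int.emod_lt_of_pos _ hkpos⟩
      have hrpos : 0 ≤ r := by
        by_contra hcon
        push_neg at hcon
        have h2 : (r + 1) * ((j:Int)+1) ≤ 0 * ((j:Int)+1) :=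
          mul_le_mul_of_nonneg_right (by omega) (by omega)
        linarith [hdm, hcb.2]
      have hrle : r ≤ inv.getD j 0 - inv.getD (j+1) 0 := by
        by_contra hcon
        push_neg at hcon
        have h2 : (inv.getD j 0 - inv.getD (j+1) 0 + 1) * ((j:Int)+1) ≤ r * ((j:Int)+1) :=
          mul_le_mul_of_nonneg_right (by omega) (by omega)
        linarith [hdm, hcb.1, hbr]
      have hrH : r ≤ inv.getD j 0 := by
        by_cases hLO : 0 ≤ inv.getD (j+1) 0
        · omega
        · push_neg at hLO
          have htl0 : pvU (inv.drop (j+1)) 0 = 0 :=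
            pvU_zero_of_le _ _ (fun v hv => by have := htl_le v hv; omega)
          have h1 := hub
          rw [hUE 0, if_pos hjhpos, htl0] at h1
          by_contra hcon
          push_neg at hcon
          have h2 : (inv.getD j 0 + 1) * ((j:Int)+1) ≤ r * ((j:Int)+1) :=
            mul_le_mul_of_nonneg_right (by omega) (by omega)
          linarith [hdm, hcb.1, h1]
      have hUt0 : pvU (pvEff inv j) (inv.getD j 0 - r) = ((j:Int)+1) * r := by
        rw [hUE _, pvU_zero_of_le _ _ (fun v hv => le_trans (htl_le v hv) (by omega))]
        rcases eq_or_lt_of_le hrpos with h | h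
        · rw [← h]
          simp
        · rw [if_pos (by omega)]
          ring
      have hth0 : pvIsTh (pvEff inv j) orders (inv.getD j 0 - r) := by
        refine ⟨by omega, ?_, ?_⟩
        · rw [hUt0]
          linarith [hdm, hcb.1]
        · by_cases hHr : inv.getD j 0 - r = 0
          · exact Or.inl hHr
          · refine Or.inr ?_
            have h2 := pvU_nonneg (inv.drop (j+1)) (inv.getD j 0 - r - 1)
            rw [hUE _, if_pos (by omega)]
            linarith [hdm, hcb.2, h2]
      have hteq : t = inv.getD j 0 - r := pvTh_unique hth hth0
      subst hteq
      have hSSt : pvSS (pvEff inv j) (inv.getD j 0 - r)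
          = ((j:Int)+1) * (if inv.getD j 0 - r < inv.getD j 0
              then pvSg (inv.getD j 0 - r) (inv.getD j 0) else 0) := by
        rw [hSSE _, pvSS_zero_of_le _ _ (fun v hv => le_trans (htl_le v hv) (by omega)), add_zero]
      have hbase2 : PySem.Int.floordiv (((j:Int)+1) * (2 * inv.getD j 0 - r + 1) * r) 2
          = ((j:Int)+1) * (if inv.getD j 0 - r < inv.getD j 0
              then pvSg (inv.getD j 0 - r) (inv.getD j 0) else 0) := by
        rcases eq_or_lt_of_le hrpos with h | h
        · rw [← h]
          have hz : ((j:Int)+1) * (2 * inv.getD j 0 - 0 + 1) * 0 = 0 := by ring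
          rw [hz, if_neg (by omega)]
          have h0 := pvFdiv_exact (dvd_zero (2:Int))
          linarith
        · rw [if_pos (by omega)]
          have h2L : 2 * PySem.Int.floordiv (((j:Int)+1) * (2 * inv.getD j 0 - r + 1) * r) 2
              = ((j:Int)+1) * (2 * inv.getD j 0 - r + 1) * r := by
            apply pvFdiv_exact
            have hre : ((j:Int)+1) * (2 * inv.getD j 0 - r + 1) * r
                = ((j:Int)+1) * ((inv.getD j 0 - (inv.getD j 0 - r))
                    * (inv.getD j 0 + (inv.getD j 0 - r) + 1)) := by
              ring
            rw [hre]
            exact Dvd.dvd.mul_left (pvTwo_dvd (inv.getD j 0 - r) (inv.getD j 0)) _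
          have e1 := pvFdiv_exact (pvTwo_dvd (inv.getD j 0 - r) (inv.getD j 0))
          have e1k := congrArg (fun x => ((j:Int)+1) * x) e1
          dsimp only at e1k
          unfold pvSg
          refine mul_left_cancel₀ (show (2:Int) ≠ 0 by norm_num) ?_
          rw [h2L]
          have hx : (2:Int) * (((j:Int)+1) * PySem.Int.floordiv
                ((inv.getD j 0 - (inv.getD j 0 - r)) * (inv.getD j 0 + (inv.getD j 0 - r) + 1)) 2)
              = ((j:Int)+1) * (2 * PySem.Int.floordiv
                ((inv.getD j 0 - (inv.getD j 0 - r)) * (inv.getD j 0 + (inv.getD j 0 - r) + 1)) 2) := by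
            ring
          rw [hx, e1k]
          ring
      have hoc : orders - ((j:Int)+1) * r = c := by linarith [hdm]
      have hrev2 : pvRev (pvEff inv j) orders (inv.getD j 0 - r)
          = PySem.Int.floordiv (((j:Int)+1) * (2 * inv.getD j 0 - r + 1) * r) 2
            + c * (inv.getD j 0 - r) := by
        unfold pvRev
        rw [hSSt, hUt0, ← hbase2, hoc]
      rw [hrev2]


lemma pvU_zero_max (xs : List Int) : pvU xs 0 = (xs.map (fun v => max v 0)).sum := by
  induction xs with
  | nil => simp [pvU]
  | cons x xs ih =>
      simp only [pvU, List.map_cons, List.sum_cons] at ih ⊢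
      rw [ih]
      have hx : (if (0:Int) < x then x - 0 else 0) = max x 0 := by split <;> omega
      rw [hx]

lemma pvAlt_core (inv : List Int) (orders t : Int) :
    (inv.foldl (fun acc v => if t < v then acc + PySem.Int.floordiv ((v - t) * (v + t + 1)) 2 else acc) 0
      + (orders - pvUnits inv t) * t) % 1000000007 = pvRev inv orders t % 1000000007 := by
  rw [pvFoldl_cond_add, pvUnits_eq]
  simp only [pvRev, pvSS, pvSg, zero_add]

lemma pvAlt_eq (inventory : List Int) (orders : Int) :
    doit_greedy_alt inventory orders
      = pvRev (PySem.List.sorted (inventory ++ [0]) (fun v => v) true) orders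
          (pvBisect (PySem.List.sorted (inventory ++ [0]) (fun v => v) true) orders 0
            (PySem.List.pyGetD (PySem.List.sorted (inventory ++ [0]) (fun v => v) true) 0 0))
          % 1000000007 :=
  pvAlt_core (PySem.List.sorted (inventory ++ [0]) (fun v => v) true) orders
    (pvBisect (PySem.List.sorted (inventory ++ [0]) (fun v => v) true) orders 0
      (PySem.List.pyGetD (PySem.List.sorted (inventory ++ [0]) (fun v => v) true) 0 0))

-- ===== VERDICT (by name: the statement is the Claim_ definition above) =====
theorem doit_greedy_spec : Claim_equal_doit_greedy := by
  intro inventory orders hdom hpre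
  unfold Spec_doit_greedy
  obtain ⟨hor0, horS⟩ := hpre
  have hA : doit_greedy inventory orders
      = pvLoopA (PySem.List.sorted (inventory ++ [0]) (fun v => v) true) 0 orders 0
          (orders.toNat + 1) := rfl
  rw [hA, pvAlt_eq]
  set inv := PySem.List.sorted (inventory ++ [0]) (fun v => v) true with hinv
  have hperm : inv.Perm (inventory ++ [0]) := PySem.List.sorted_perm ..
  have hne : inv ≠ [] := by
    intro h
    have hl := hperm.length_eq
    rw [h] at hl
    simp at hl
  have hmem : (0 : Int) ∈ inv := by
    rw [hinv, PySem.List.mem_sorted]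
    simp
  have hsort : inv.Pairwise (fun a b => b ≤ a) := by
    have h1 := PySem.List.sorted_pairwise_rev (xs := inventory ++ [0]) (key := fun v => v)
    simpa [← hinv] using h1
  have hilt : 0 < inv.length := List.length_pos_of_ne_nil hne
  have hgd0 : inv.getD 0 0 = inv[0] := List.getD_eq_getElem inv 0 hilt
  have hhead : PySem.List.pyGetD inv 0 0 = inv.getD 0 0 := PySem.List.pyGetD_zero inv 0
  have hcons : inv = inv[0] :: inv.drop 1 := by
    have h := List.drop_eq_getElem_cons (l := inv) (i := 0) hilt
    rw [List.drop_zero] at h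
    exact h
  have hmax : ∀ v ∈ inv, v ≤ inv.getD 0 0 := by
    intro v hv
    rw [hgd0]
    rcases List.mem_cons.mp (hcons ▸ hv) with rfl | hv'
    · exact le_refl _
    · exact (List.pairwise_cons.mp (hcons ▸ hsort)).1 v hv'
  have hhead0 : 0 ≤ inv.getD 0 0 := le_trans (le_refl _) (hmax 0 hmem)
  have hU_head : pvU inv (inv.getD 0 0) = 0 := pvU_zero_of_le _ _ hmax
  have hUsum : pvU inv 0 = (inventory.map (fun v => max v 0)).sum := by
    rw [pvU_perm hperm, pvU_append, pvU_zero_max]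
    simp [pvU]
  have heff0 : pvEff inv 0 = inv := by
    unfold pvEff
    rw [hgd0]
    conv_rhs => rw [hcons]
    simp
  have hth : pvIsTh inv orders
      (pvBisect inv orders 0 (PySem.List.pyGetD inv 0 0)) := by
    apply pvBisect_spec inv orders (PySem.List.pyGetD inv 0 0 - 0).toNat 0
      (PySem.List.pyGetD inv 0 0) rfl le_rfl
    · rw [hhead]; exact hhead0
    · rw [hhead, hU_head]; exact hor0
    · exact Or.inl rfl
  have hloop := pvLoop_spec (orders.toNat + 1) inv 0 orders 0
      (pvBisect inv orders 0 (PySem.List.pyGetD inv 0 0))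
      (by omega) hilt (by simpa using hsort) (by simpa using hmem) hor0
      (by rw [heff0, hUsum]; exact horS) (le_refl 0) (by norm_num)
      (by rw [heff0]; exact hth)
  rw [hloop, heff0, zero_add]
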